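-- pv_equiv track=rewrite | github.com/AmanKashyap0807/Adobe-India-Hackathon-1A | src/extract/features.py | get_case_pattern
-- ===== SOURCE A (Python) =====
-- def get_case_pattern(text):
--     """Get case pattern: 0=lowercase, 1=mixed, 2=uppercase, 3=title"""
--     if not text:
--         return 0
--
--     words = text.split()
--     if not words:
--         return 0
--
--     upper_count = sum(1 for word in words if word.isupper())
--     lower_count = sum(1 for word in words if word.islower())
--     title_count = sum(1 for word in words if word.istitle())
--
--     if upper_count == len(words):
--         return 2  # All uppercase
--     elif lower_count == len(words):
--         return 0  # All lowercase
--     elif title_count == len(words):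
--         return 3  # Title case
--     else:
--         return 1  # Mixed case
-- ===== SOURCE B (Python) =====
-- def get_case_pattern(text):
--     """Get case pattern: 0=lowercase, 1=mixed, 2=uppercase, 3=title"""
--     any_word = False
--     ok_upper = ok_lower = ok_title = True
--     in_word = False
--     word_has_alpha = False
--     prev_cased = False
--     word_title = True
--     word_cased = False
--     for c in text:
--         if c.isspace():
--             if in_word:
--                 ok_upper = ok_upper and word_has_alpha
--                 ok_lower = ok_lower and word_has_alpha
--                 ok_title = ok_title and word_title and word_cased
--                 in_word = False
--         else:
--             if not in_word:
--                 in_word = True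
--                 any_word = True
--                 word_has_alpha = False
--                 prev_cased = False
--                 word_title = True
--                 word_cased = False
--             if c.isalpha():
--                 word_has_alpha = True
--             if c.islower():
--                 ok_upper = False
--             if c.isupper():
--                 ok_lower = False
--             # title-case automaton (CPython's istitle loop)
--             if c.isupper():
--                 if prev_cased:
--                     word_title = False
--                 prev_cased = True
--                 word_cased = True
--             elif c.islower():
--                 if not prev_cased:
--                     word_title = False
--                 prev_cased = True
--             else:
--                 prev_cased = False
--     if in_word:
--         ok_upper = ok_upper and word_has_alpha
--         ok_lower = ok_lower and word_has_alpha
--         ok_title = ok_title and word_title and word_cased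
--     if not any_word:
--         return 0
--     if ok_upper:
--         return 2
--     if ok_lower:
--         return 0
--     if ok_title:
--         return 3
--     return 1
-- ===== Notes on version B (the rewrite author's own statement) =====
-- stated objective: alternative
-- what changed: Replaces split()-then-three-counting-passes with a single character-level state machine that never builds the word list: it scans the characters once, maintains per-word state (has-alpha flag and the istitle automaton) and three global flags, and closes a word at each whitespace boundary.
import Mathlib
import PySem

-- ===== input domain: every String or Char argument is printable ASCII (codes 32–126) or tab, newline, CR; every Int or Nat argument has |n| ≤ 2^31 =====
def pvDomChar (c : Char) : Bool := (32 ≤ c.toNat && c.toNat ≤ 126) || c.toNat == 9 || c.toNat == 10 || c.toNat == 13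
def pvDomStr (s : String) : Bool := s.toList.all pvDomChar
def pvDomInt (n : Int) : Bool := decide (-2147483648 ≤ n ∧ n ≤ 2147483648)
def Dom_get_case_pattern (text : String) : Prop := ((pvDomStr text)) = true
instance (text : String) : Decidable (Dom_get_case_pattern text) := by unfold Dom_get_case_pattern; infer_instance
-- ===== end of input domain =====

-- B replaces A's split()-plus-three-counting-passes by a single character-level state machine
-- that never builds the word list (objective: alternative).

-- ===== PORT A =====
-- Hand ports of Python's str.isupper/str.islower/str.istitle (not in PySem);
-- exact on the printable-ASCII domain, where cased chars are exactly the alphabetic ones.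
def pyStrIsUpper (s : String) : Bool :=
  s.toList.any PySem.Chars.isalpha && s.toList.all (fun c => !(PySem.Chars.islower c))

def pyStrIsLower (s : String) : Bool :=
  s.toList.any PySem.Chars.isalpha && s.toList.all (fun c => !(PySem.Chars.isupper c))

-- state (prevCased, foundCased) threaded through the chars, exactly CPython's istitle loop
def istitleGo : List Char → Bool → Bool → Bool
  | [], _, found => found
  | c :: rest, prevCased, found =>
    if PySem.Chars.isupper c then
      if prevCased then false else istitleGo rest true true
    else if PySem.Chars.islower c then
      if !prevCased then false else istitleGo rest true found
    else istitleGo rest false found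

def pyStrIsTitle (s : String) : Bool := istitleGo s.toList false false

def get_case_pattern (text : String) : Int :=
  if text = "" then 0
  else
    let words := PySem.Str.split₀ text
    if words = [] then 0
    else
      let upper_count : Int := words.foldl (fun a w => if pyStrIsUpper w then a + 1 else a) 0
      let lower_count : Int := words.foldl (fun a w => if pyStrIsLower w then a + 1 else a) 0
      let title_count : Int := words.foldl (fun a w => if pyStrIsTitle w then a + 1 else a) 0
      if upper_count = (words.length : Int) then 2
      else if lower_count = (words.length : Int) then 0
      else if title_count = (words.length : Int) then 3
      else 1

-- ===== PORT B =====
-- the loop state of Source B: the three global flags, any_word/in_word, and the per-word state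
structure ScanSt where
  anyW : Bool
  okU : Bool
  okL : Bool
  okT : Bool
  inW : Bool
  ha : Bool   -- word_has_alpha
  pc : Bool   -- prev_cased
  wt : Bool   -- word_title
  wc : Bool   -- word_cased
deriving DecidableEq, Repr

-- the three-line word-closing block of Source B (it appears twice there, verbatim)
def closeWord (st : ScanSt) : ScanSt :=
  { st with okU := st.okU && st.ha, okL := st.okL && st.ha,
            okT := st.okT && (st.wt && st.wc), inW := false }

def scanStep (st : ScanSt) (c : Char) : ScanSt :=
  if PySem.Chars.isspace c then
    if st.inW then closeWord st else st
  else
    let st := if st.inW then st else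
      { st with inW := true, anyW := true, ha := false, pc := false, wt := true, wc := false }
    let st := { st with ha := st.ha || PySem.Chars.isalpha c }
    let st := { st with okU := st.okU && !PySem.Chars.islower c }
    let st := { st with okL := st.okL && !PySem.Chars.isupper c }
    if PySem.Chars.isupper c then { st with wt := st.wt && !st.pc, pc := true, wc := true }
    else if PySem.Chars.islower c then { st with wt := st.wt && st.pc, pc := true }
    else { st with pc := false }

-- Source B's code after the loop: final close and the priority chain
def finishScan (st : ScanSt) : Int :=
  let st := if st.inW then closeWord st else st
  if !st.anyW then 0
  else if st.okU then 2
  else if st.okL then 0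
  else if st.okT then 3
  else 1

def get_case_pattern_alt (text : String) : Int :=
  finishScan (text.toList.foldl scanStep ⟨false, true, true, true, false, false, false, true, false⟩)

-- ===== PRECONDITION & SPEC =====
def Spec_get_case_pattern (text : String) (out : Int) : Prop := out = get_case_pattern_alt text
instance (text : String) (out : Int) : Decidable (Spec_get_case_pattern text out) := by unfold Spec_get_case_pattern; infer_instance

-- ===== CLAIM (what is proved, stated in full; the proofs are below) =====
def Claim_equal_get_case_pattern : Prop := ∀ (text : String), Dom_get_case_pattern text → Spec_get_case_pattern text (get_case_pattern text)

-- ===== LEMMAS AND PROOFS =====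

-- word-level predicates on the char list of a word
def chIsUpper (w : List Char) : Bool := w.any PySem.Chars.isalpha && w.all (fun c => !(PySem.Chars.islower c))
def chIsLower (w : List Char) : Bool := w.any PySem.Chars.isalpha && w.all (fun c => !(PySem.Chars.isupper c))

-- the istitle automaton as a fold on (prevCased, validSoFar, foundCased)
def tstep (s : Bool × Bool × Bool) (c : Char) : Bool × Bool × Bool :=
  if PySem.Chars.isupper c then (true, s.2.1 && !s.1, true)
  else if PySem.Chars.islower c then (true, s.2.1 && s.1, s.2.2)
  else (false, s.2.1, s.2.2)

def tfold (w : List Char) : Bool × Bool × Bool := w.foldl tstep (false, true, false)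

def chIsTitle (w : List Char) : Bool := (tfold w).2.1 && (tfold w).2.2

-- the final priority chain as a function of the four flags
def decide4 (anyW u l t : Bool) : Int :=
  if anyW then (if u then 2 else if l then 0 else if t then 3 else 1) else 0

-- word-list-level reading of the final decision, with the flags as accumulators
def wordsDecide (ws : List (List Char)) (anyW u l t : Bool) : Int :=
  decide4 (anyW || !ws.isEmpty) (u && ws.all chIsUpper) (l && ws.all chIsLower) (t && ws.all chIsTitle)

-- A's counting fold is countP
lemma countFold (p : String → Bool) (ws : List String) (acc : Int) :
    ws.foldl (fun a w => if p w then a + 1 else a) acc = acc + ws.countP p := by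
  induction ws generalizing acc with
  | nil => simp
  | cons w ws ih =>
    simp only [List.foldl_cons, List.countP_cons, ih]
    by_cases h : p w <;> simp [h] <;> ring

lemma count_eq_len_iff_all (p : String → Bool) (ws : List String) :
    ((0 : Int) + ws.countP p = (ws.length : Int)) ↔ ws.all p = true := by
  rw [zero_add, Int.natCast_inj, List.countP_eq_length, List.all_eq_true]

-- once the validity component is false it stays false
lemma tfold_false (cs : List Char) (p f : Bool) :
    (cs.foldl tstep (p, false, f)).2.1 = false := by
  induction cs generalizing p f with
  | nil => rfl
  | cons c cs ih =>
    simp only [List.foldl_cons, tstep]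
    split_ifs <;> simp [ih]

-- A's istitle loop equals the fold automaton
lemma istitleGo_eq_tfold (cs : List Char) (p f : Bool) :
    istitleGo cs p f = ((cs.foldl tstep (p, true, f)).2.1 && (cs.foldl tstep (p, true, f)).2.2) := by
  induction cs generalizing p f with
  | nil => simp [istitleGo]
  | cons c cs ih =>
    simp only [istitleGo, List.foldl_cons, tstep]
    by_cases hu : PySem.Chars.isupper c
    · simp only [hu, if_true]
      cases p with
      | false => simpa using ih true true
      | true => simp [tfold_false]
    · by_cases hl : PySem.Chars.islower c
      · simp only [hu, hl, if_true]
        cases p with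
        | false => simp [tfold_false]
        | true => simpa using ih true f
      · simpa [hu, hl] using ih false f

-- accumulator lemma for split₀.go
lemma go_acc (cs : List Char) : ∀ cur acc,
    PySem.Chars.split₀.go cs cur acc = acc.reverse ++ PySem.Chars.split₀.go cs cur [] := by
  induction cs with
  | nil =>
    intro cur acc
    rw [PySem.Chars.split₀.go, PySem.Chars.split₀.go]
    by_cases h : cur = [] <;> simp [h]
  | cons c cs ih =>
    intro cur acc
    rw [PySem.Chars.split₀.go]
    conv_rhs => rw [PySem.Chars.split₀.go]
    by_cases hs : PySem.Chars.isspace c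
    · by_cases h : cur = []
      · simp only [hs, h, if_true, List.isEmpty_nil]
        rw [ih [] acc]
      · have hne : cur.isEmpty = false := by simp [h]
        simp only [hs, if_true, hne, Bool.false_eq_true, if_false]
        rw [ih [] (cur.reverse :: acc), ih [] [cur.reverse]]
        simp
    · have hs' : PySem.Chars.isspace c = false := by simp [hs]
      simp only [hs', Bool.false_eq_true, if_false]
      rw [ih (c :: cur) acc]

-- a word in progress guarantees a nonempty word list
lemma go_ne (cs : List Char) : ∀ cur, cur ≠ [] → PySem.Chars.split₀.go cs cur [] ≠ [] := by
  induction cs with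
  | nil =>
    intro cur h
    rw [PySem.Chars.split₀.go]
    simp [h]
  | cons c cs ih =>
    intro cur h
    rw [PySem.Chars.split₀.go]
    by_cases hs : PySem.Chars.isspace c
    · have hne : cur.isEmpty = false := by simp [h]
      simp only [hs, if_true, hne, Bool.false_eq_true, if_false]
      rw [go_acc]
      simp
    · have hs' : PySem.Chars.isspace c = false := by simp [hs]
      simp only [hs', Bool.false_eq_true, if_false]
      exact ih (c :: cur) (by simp)

-- the scan step on a whitespace char
lemma scanStep_space (st : ScanSt) (c : Char) (h : PySem.Chars.isspace c = true) :
    scanStep st c = if st.inW then closeWord st else st := by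
  simp [scanStep, h]

-- the scan step on a word char while inside a word
lemma scanStep_inword (st : ScanSt) (c : Char) (h : PySem.Chars.isspace c = false)
    (hin : st.inW = true) :
    scanStep st c =
      { anyW := st.anyW, okU := st.okU && !(PySem.Chars.islower c),
        okL := st.okL && !(PySem.Chars.isupper c), okT := st.okT, inW := true,
        ha := st.ha || PySem.Chars.isalpha c,
        pc := (tstep (st.pc, st.wt, st.wc) c).1,
        wt := (tstep (st.pc, st.wt, st.wc) c).2.1,
        wc := (tstep (st.pc, st.wt, st.wc) c).2.2 } := by
  simp only [scanStep, h, Bool.false_eq_true, if_false, hin, if_true, tstep]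
  split_ifs <;> rfl

-- the scan step on a word char that opens a new word
lemma scanStep_openword (st : ScanSt) (c : Char) (h : PySem.Chars.isspace c = false)
    (hin : st.inW = false) :
    scanStep st c =
      { anyW := true, okU := st.okU && !(PySem.Chars.islower c),
        okL := st.okL && !(PySem.Chars.isupper c), okT := st.okT, inW := true,
        ha := PySem.Chars.isalpha c,
        pc := (tstep (false, true, false) c).1,
        wt := (tstep (false, true, false) c).2.1,
        wc := (tstep (false, true, false) c).2.2 } := by
  simp only [scanStep, h, Bool.false_eq_true, if_false, hin, tstep]
  split_ifs <;> rfl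

-- reading off the answer outside a word
lemma finishScan_out (st : ScanSt) (hin : st.inW = false) :
    finishScan st = decide4 st.anyW st.okU st.okL st.okT := by
  cases h : st.anyW <;> simp [finishScan, decide4, hin, h]

-- reading off the answer inside a word (the trailing close)
lemma finishScan_in (st : ScanSt) (hin : st.inW = true) :
    finishScan st
      = decide4 st.anyW (st.okU && st.ha) (st.okL && st.ha) (st.okT && (st.wt && st.wc)) := by
  cases h : st.anyW <;> simp [finishScan, closeWord, decide4, hin, h]

-- a step of tfold, from the back
lemma tfold_concat (cur : List Char) (c : Char) :
    tfold (c :: cur).reverse = tstep (tfold cur.reverse) c := by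
  simp [tfold, List.reverse_cons, List.foldl_append]

-- congruence for the final decision, componentwise
lemma decide4_congr {a a' u u' l l' t t' : Bool} (ea : a = a') (eu : u = u')
    (el : l = l') (et : t = t') : decide4 a u l t = decide4 a' u' l' t' := by
  rw [ea, eu, el, et]

-- the per-word predicates of A's port, on the char-list side
lemma pyU_of (w : List Char) : pyStrIsUpper (String.ofList w) = chIsUpper w := by
  simp [pyStrIsUpper, chIsUpper]

lemma pyL_of (w : List Char) : pyStrIsLower (String.ofList w) = chIsLower w := by
  simp [pyStrIsLower, chIsLower]

lemma pyT_of (w : List Char) : pyStrIsTitle (String.ofList w) = chIsTitle w := by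
  simp [pyStrIsTitle, chIsTitle, istitleGo_eq_tfold, tfold]

-- the heart: the character scan computes the word-level decision over split₀.go
lemma scan_split (cs : List Char) :
    (∀ st : ScanSt, st.inW = false →
      finishScan (cs.foldl scanStep st)
        = wordsDecide (PySem.Chars.split₀.go cs [] []) st.anyW st.okU st.okL st.okT)
    ∧ (∀ (cur : List Char) (u l : Bool) (st : ScanSt), cur ≠ [] → st.inW = true → st.anyW = true →
      st.ha = cur.any PySem.Chars.isalpha →
      st.okU = (u && cur.all (fun c => !(PySem.Chars.islower c))) →
      st.okL = (l && cur.all (fun c => !(PySem.Chars.isupper c))) →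
      (st.pc, st.wt, st.wc) = tfold cur.reverse →
      finishScan (cs.foldl scanStep st)
        = wordsDecide (PySem.Chars.split₀.go cs cur []) true u l st.okT) := by
  induction cs with
  | nil =>
    constructor
    · intro st hin
      rw [PySem.Chars.split₀.go]
      simp [finishScan_out st hin, wordsDecide]
    · intro cur u l st hcur hin hany hha hU hL hT
      rw [PySem.Chars.split₀.go]
      have hwt : st.wt = (tfold cur.reverse).2.1 := by rw [← hT]
      have hwc : st.wc = (tfold cur.reverse).2.2 := by rw [← hT]
      rw [List.foldl_nil, finishScan_in st hin, if_neg (by simp [hcur])]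
      simp only [List.reverse_cons, List.reverse_nil, List.nil_append, wordsDecide,
        List.all_cons, List.all_nil, Bool.and_true, List.isEmpty_cons, Bool.not_false,
        Bool.or_true]
      refine decide4_congr hany ?_ ?_ ?_
      · rw [hU, hha]
        simp only [chIsUpper, List.any_reverse, List.all_reverse]
        cases u <;> cases cur.any PySem.Chars.isalpha <;>
          cases cur.all (fun c => !(PySem.Chars.islower c)) <;> rfl
      · rw [hL, hha]
        simp only [chIsLower, List.any_reverse, List.all_reverse]
        cases l <;> cases cur.any PySem.Chars.isalpha <;>
          cases cur.all (fun c => !(PySem.Chars.isupper c)) <;> rfl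
      · rw [hwt, hwc]
        simp only [chIsTitle]
  | cons c cs ih =>
    constructor
    · -- not inside a word
      intro st hin
      rw [PySem.Chars.split₀.go]
      by_cases hs : PySem.Chars.isspace c = true
      · rw [List.foldl_cons, scanStep_space st c hs, if_neg (by simp [hin]), if_pos hs]
        exact ih.1 st hin
      · have hs' : PySem.Chars.isspace c = false := by simp at hs; exact hs
        rw [List.foldl_cons, scanStep_openword st c hs' hin, if_neg hs]
        rw [ih.2 [c] st.okU st.okL _ (by simp) rfl rfl (by simp) (by simp) (by simp)
          (by simp [tfold])]
        have hne' : (PySem.Chars.split₀.go cs [c] []).isEmpty = false := by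
          simpa [List.isEmpty_iff] using go_ne cs [c] (by simp)
        unfold wordsDecide
        exact decide4_congr (by simp [hne']) rfl rfl rfl
    · -- inside a word, partial word cur (reversed)
      intro cur u l st hcur hin hany hha hU hL hT
      rw [PySem.Chars.split₀.go]
      by_cases hs : PySem.Chars.isspace c = true
      · -- the word closes here
        rw [List.foldl_cons, scanStep_space st c hs, if_pos hin, if_pos hs,
          if_neg (by simp [hcur])]
        rw [ih.1 (closeWord st) rfl, go_acc cs [] [cur.reverse]]
        have hwt : st.wt = (tfold cur.reverse).2.1 := by rw [← hT]
        have hwc : st.wc = (tfold cur.reverse).2.2 := by rw [← hT]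
        simp only [closeWord, List.reverse_cons, List.reverse_nil, List.nil_append,
          List.cons_append, wordsDecide, List.all_cons, List.isEmpty_cons, Bool.not_false,
          Bool.or_true]
        refine decide4_congr (by simp [hany]) ?_ ?_ ?_
        · rw [hU, hha]
          simp only [chIsUpper, List.any_reverse, List.all_reverse]
          cases u <;> cases cur.any PySem.Chars.isalpha <;>
            cases cur.all (fun c => !(PySem.Chars.islower c)) <;>
            cases (PySem.Chars.split₀.go cs [] []).all chIsUpper <;> rfl
        · rw [hL, hha]
          simp only [chIsLower, List.any_reverse, List.all_reverse]
          cases l <;> cases cur.any PySem.Chars.isalpha <;>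
            cases cur.all (fun c => !(PySem.Chars.isupper c)) <;>
            cases (PySem.Chars.split₀.go cs [] []).all chIsLower <;> rfl
        · rw [hwt, hwc]
          simp only [chIsTitle]
          cases st.okT <;> cases (tfold cur.reverse).2.1 <;> cases (tfold cur.reverse).2.2 <;>
            cases (PySem.Chars.split₀.go cs [] []).all chIsTitle <;> rfl
      · -- the word grows by c
        have hs' : PySem.Chars.isspace c = false := by simp at hs; exact hs
        rw [List.foldl_cons, scanStep_inword st c hs' hin, if_neg hs]
        refine ih.2 (c :: cur) u l _ (by simp) rfl hany ?_ ?_ ?_ ?_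
        · show (st.ha || PySem.Chars.isalpha c) = (c :: cur).any PySem.Chars.isalpha
          rw [hha, List.any_cons]
          cases PySem.Chars.isalpha c <;> cases cur.any PySem.Chars.isalpha <;> rfl
        · show (st.okU && !(PySem.Chars.islower c))
            = (u && (c :: cur).all (fun x => !(PySem.Chars.islower x)))
          rw [hU, List.all_cons]
          cases u <;> cases PySem.Chars.islower c <;>
            cases cur.all (fun x => !(PySem.Chars.islower x)) <;> rfl
        · show (st.okL && !(PySem.Chars.isupper c))
            = (l && (c :: cur).all (fun x => !(PySem.Chars.isupper x)))
          rw [hL, List.all_cons]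
          cases l <;> cases PySem.Chars.isupper c <;>
            cases cur.all (fun x => !(PySem.Chars.isupper x)) <;> rfl
        · show ((tstep (st.pc, st.wt, st.wc) c).1, (tstep (st.pc, st.wt, st.wc) c).2.1,
              (tstep (st.pc, st.wt, st.wc) c).2.2) = tfold (c :: cur).reverse
          rw [tfold_concat, ← hT]

-- ===== VERDICT (by name: the statement is the Claim_ definition above) =====
theorem get_case_pattern_spec : Claim_equal_get_case_pattern := by
  intro text _
  unfold Spec_get_case_pattern
  by_cases he : text = ""
  · subst he
    rfl
  · unfold get_case_pattern get_case_pattern_alt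
    simp only [he, if_false]
    rw [(scan_split text.toList).1 _ rfl]
    unfold PySem.Str.split₀ PySem.Chars.split₀
    simp only [countFold, count_eq_len_iff_all, wordsDecide]
    by_cases hw : PySem.Chars.split₀.go text.toList [] [] = []
    · simp [hw, decide4]
    · have hne : (PySem.Chars.split₀.go text.toList [] []).isEmpty = false := by
        simpa [List.isEmpty_iff] using hw
      rw [if_neg (by simp [hw])]
      simp only [List.all_map, Function.comp_def, pyU_of, pyL_of, pyT_of]
      simp [decide4, hne]
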